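-- pv_equiv track=rewrite | github.com/Selfnet/dashboard | backend/dash/conversions.py | two_latest_values
-- ===== SOURCE A (Python) =====
-- def two_latest_values(l):
--     # find the two most recent values != None
--     a = None # first value
--     b = None # second (most recent) value
--     i = 1
--     while b == None:
--         b = l[-i]
--         i += 1
--     # found b
--     while a == None:
--         a = l[-i]
--         i += 1
--     # found a
--     return a,b
-- ===== SOURCE B (Python) =====
-- def two_latest_values(l):
--     # collect all non-None values in order, then take the last two
--     vals = [x for x in l if x != None]
--     return vals[-2], vals[-1]
-- ===== Notes on version B (the rewrite author's own statement) =====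
-- stated objective: simpler
-- what changed: Replaced A's two sequential backward while-loops with negative indexing by a single filtering pass collecting all non-None values, returning the last two by negative indexing.
import Mathlib
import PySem

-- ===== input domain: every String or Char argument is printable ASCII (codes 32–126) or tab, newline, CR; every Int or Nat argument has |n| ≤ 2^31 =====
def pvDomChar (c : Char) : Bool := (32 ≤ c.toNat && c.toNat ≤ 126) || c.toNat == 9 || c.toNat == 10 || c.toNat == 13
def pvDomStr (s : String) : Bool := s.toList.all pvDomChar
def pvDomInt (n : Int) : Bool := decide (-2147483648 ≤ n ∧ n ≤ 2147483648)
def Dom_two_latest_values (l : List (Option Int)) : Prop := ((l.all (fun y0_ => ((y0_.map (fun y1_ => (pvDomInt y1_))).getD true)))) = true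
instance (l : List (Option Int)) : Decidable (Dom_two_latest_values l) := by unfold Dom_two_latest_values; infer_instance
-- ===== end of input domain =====

-- B replaces A's two backward early-exit while-loops by one filtering pass over the
-- whole list followed by constant-time negative indexing of the last two kept values (objective: simpler).


-- ===== PORT A =====
-- the 'while x == None' loop: fuel bounds the number of iterations (the loop stops
-- by itself when l[-i] raises IndexError, modelled by pyGet? = none); on success it
-- returns (i after the increment, the value found)
def pvLoopFind (l : List (Option Int)) : Nat → Nat → Option (Nat × Int)
  | 0, _ => none
  | fuel + 1, i =>
    match PySem.List.pyGet? l (-(i : Int)) with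
    | none => none                                -- IndexError (outside Pre_)
    | some none => pvLoopFind l fuel (i + 1)      -- value is None: keep looping
    | some (some v) => some (i + 1, v)            -- found a non-None value

def two_latest_values (l : List (Option Int)) : Int × Int :=
  match pvLoopFind l (l.length + 1) 1 with
  | none => (0, 0)                                -- IndexError (outside Pre_)
  | some (i, b) =>
    match pvLoopFind l (l.length + 1) i with
    | none => (0, 0)                              -- IndexError (outside Pre_)
    | some (_, a) => (a, b)

-- ===== PORT B =====
def two_latest_values_alt (l : List (Option Int)) : Int × Int :=
  let vals : List Int := l.filterMap id           -- [x for x in l if x != None]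
  match PySem.List.pyGet? vals (-2), PySem.List.pyGet? vals (-1) with
  | some a, some b => (a, b)
  | _, _ => (0, 0)                                -- IndexError (outside Pre_)

-- ===== PRECONDITION & SPEC =====
-- A (and B) raise IndexError when the list holds fewer than two non-None values
def Pre_two_latest_values (l : List (Option Int)) : Prop :=
  2 ≤ (l.filterMap id).length
instance (l : List (Option Int)) : Decidable (Pre_two_latest_values l) := by
  unfold Pre_two_latest_values; infer_instance

def pvWitness_two_latest_values : List (Option Int) := [some 1, none, some 2]

def Spec_two_latest_values (l : List (Option Int)) (out : Int × Int) : Prop := out = two_latest_values_alt l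
instance (l : List (Option Int)) (out : Int × Int) : Decidable (Spec_two_latest_values l out) := by unfold Spec_two_latest_values; infer_instance

-- ===== CLAIM (what is proved, stated in full; the proofs are below) =====
def Claim_equal_two_latest_values : Prop := ∀ (l : List (Option Int)), Dom_two_latest_values l → Pre_two_latest_values l → Spec_two_latest_values l (two_latest_values l)

-- ===== LEMMAS AND PROOFS =====

-- l[-i] is entry i-1 of the reversed list (none on IndexError), for i ≥ 1
lemma pyGet_neg_rev (l : List (Option Int)) (i : Nat) (h : 1 ≤ i) :
    PySem.List.pyGet? l (-(i : Int)) = l.reverse[i - 1]? := by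
  by_cases hle : i ≤ l.length
  · rw [PySem.List.pyGet?_neg_natCast l i (by omega) hle]
    rw [List.getElem?_reverse (by omega)]
    congr 1
    omega
  · have h1 : PySem.List.pyGet? l (-(i : Int)) = none := by
      rw [PySem.List.pyGet?_eq_none_iff]
      simp only [PySem.Raise.InRange, not_and_or]
      omega
    have h2 : l.reverse[i - 1]? = none := by
      rw [List.getElem?_eq_none]
      simp only [List.length_reverse]
      omega
    rw [h1, h2]

-- characterisation of the while-loop: scanning from index i covers exactly the
-- suffix of l.reverse starting at position i-1
lemma pvLoopFind_eq (t : List (Option Int)) : ∀ (l : List (Option Int)) (i fuel : Nat),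
    1 ≤ i → t = l.reverse.drop (i - 1) → t.length + 1 ≤ fuel →
    (match pvLoopFind l fuel i with
     | none => t.filterMap id = []
     | some (i2, b) => 1 ≤ i2 ∧ t.filterMap id = b :: (l.reverse.drop (i2 - 1)).filterMap id) := by
  induction t with
  | nil =>
    intro l i fuel hi ht hf
    obtain ⟨f, rfl⟩ : ∃ f, fuel = f + 1 := ⟨fuel - 1, by omega⟩
    have hget : PySem.List.pyGet? l (-(i : Int)) = none := by
      rw [pyGet_neg_rev l i hi, List.getElem?_eq_none]
      simp only [List.length_reverse]
      have := congrArg List.length ht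
      simp only [List.length_drop, List.length_nil, List.length_reverse] at this
      omega
    simp [pvLoopFind, hget]
  | cons x t' ih =>
    intro l i fuel hi ht hf
    obtain ⟨f, rfl⟩ : ∃ f, fuel = f + 1 := ⟨fuel - 1, by omega⟩
    have hhead : l.reverse[i - 1]? = some x := by
      have := congrArg List.head? ht
      rw [List.head?_drop] at this
      simp at this
      exact this.symm
    have htail : t' = l.reverse.drop i := by
      have := congrArg List.tail ht
      rw [List.tail_drop] at this
      simpa [show i - 1 + 1 = i by omega] using this
    have hget : PySem.List.pyGet? l (-(i : Int)) = some x := by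
      rw [pyGet_neg_rev l i hi]; exact hhead
    cases x with
    | none =>
      have := ih l (i + 1) f (by omega) (by simpa using htail) (by simp at hf ⊢; omega)
      simpa [pvLoopFind, hget] using this
    | some b =>
      simp only [pvLoopFind, hget]
      exact ⟨by omega, by simp [htail]⟩

-- filtering commutes with reversal
lemma filterMap_rev (l : List (Option Int)) :
    (l.reverse).filterMap id = (l.filterMap id).reverse := by
  simp [List.filterMap_reverse]

-- ===== VERDICT (by name: the statement is the Claim_ definition above) =====
theorem two_latest_values_spec : Claim_equal_two_latest_values := by
  intro l _ hpre
  unfold Spec_two_latest_values two_latest_values two_latest_values_alt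
  have h1 := pvLoopFind_eq l.reverse l 1 (l.length + 1) (by omega) (by simp) (by simp)
  cases hA : pvLoopFind l (l.length + 1) 1 with
  | none =>
    rw [hA] at h1
    rw [filterMap_rev] at h1
    have : (l.filterMap id).length = 0 := by
      have := congrArg List.length h1; simpa using this
    unfold Pre_two_latest_values at hpre
    omega
  | some p =>
    obtain ⟨i2, b⟩ := p
    rw [hA] at h1
    obtain ⟨hi2, hb⟩ := h1
    have h2 := pvLoopFind_eq (l.reverse.drop (i2 - 1)) l i2 (l.length + 1) hi2 rfl
      (by simp only [List.length_drop, List.length_reverse]; omega)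
    cases hA2 : pvLoopFind l (l.length + 1) i2 with
    | none =>
      rw [hA2] at h2
      rw [h2] at hb
      rw [filterMap_rev] at hb
      have : (l.filterMap id).length = 1 := by
        have := congrArg List.length hb; simpa using this
      unfold Pre_two_latest_values at hpre
      omega
    | some q =>
      obtain ⟨i3, a⟩ := q
      rw [hA2] at h2
      obtain ⟨_, ha⟩ := h2
      rw [ha] at hb
      -- hb : (l.reverse).filterMap id = b :: a :: rest
      rw [filterMap_rev] at hb
      set vals := l.filterMap id with hv
      set rest := (l.reverse.drop (i3 - 1)).filterMap id with hr
      have hlen : 2 ≤ vals.length := hpre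
      have hv2 : vals = rest.reverse ++ [a, b] := by
        have := congrArg List.reverse hb
        simpa using this
      have hget1 : PySem.List.pyGet? vals (-1) = some b := by
        rw [show (-1 : Int) = -((1:Nat) : Int) by norm_num,
          PySem.List.pyGet?_neg_natCast vals 1 (by omega) (by omega), hv2]
        have h' : (rest.reverse ++ [a, b]).length - 1 = rest.reverse.length + 1 := by simp
        rw [h', List.getElem?_append_right (by omega)]
        simp
      have hget2 : PySem.List.pyGet? vals (-2) = some a := by
        rw [show (-2 : Int) = -((2:Nat) : Int) by norm_num,
          PySem.List.pyGet?_neg_natCast vals 2 (by omega) (by omega), hv2]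
        have h' : (rest.reverse ++ [a, b]).length - 2 = rest.reverse.length := by simp
        rw [h', List.getElem?_append_right (by omega)]
        simp
      simp [hA2, hget1, hget2]
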